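-- pv_equiv track=rewrite | github.com/ElJulii/search-information-project | vector_search.py | build_query_vector
-- ===== SOURCE A (Python) =====
-- def build_query_vector(query_terms, vocabulary):
--
--     query_vector = {}
--
--     for term in vocabulary:
--         query_vector[term] = 0
--
--     for term in query_terms:
--         if term in query_vector:
--             query_vector[term] += 1
--
--     return query_vector
-- ===== SOURCE B (Python) =====
-- def build_query_vector(query_terms, vocabulary):
--     return {term: query_terms.count(term) for term in vocabulary}
-- ===== Notes on version B (the rewrite author's own statement) =====
-- stated objective: simpler
-- what changed: B drops A's counting dict entirely: one comprehension over the vocabulary with an inner full scan query_terms.count(term) per vocabulary term, instead of A's zero-initialization loop plus a query-driven increment loop with a membership guard.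
import Mathlib
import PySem

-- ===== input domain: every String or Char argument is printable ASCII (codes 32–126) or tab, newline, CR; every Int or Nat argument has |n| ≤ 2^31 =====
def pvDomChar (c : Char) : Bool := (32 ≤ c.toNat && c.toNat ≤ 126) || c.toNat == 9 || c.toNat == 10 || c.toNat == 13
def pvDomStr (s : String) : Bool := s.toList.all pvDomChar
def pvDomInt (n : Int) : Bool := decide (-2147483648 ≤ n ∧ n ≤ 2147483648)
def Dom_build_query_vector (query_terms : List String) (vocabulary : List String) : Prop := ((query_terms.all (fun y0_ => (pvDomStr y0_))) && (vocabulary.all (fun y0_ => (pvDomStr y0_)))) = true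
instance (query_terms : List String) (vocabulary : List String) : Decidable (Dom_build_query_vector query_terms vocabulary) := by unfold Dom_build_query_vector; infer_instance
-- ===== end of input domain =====

-- B drops A's counting dict: one pass over the vocabulary with an inner scan
-- query_terms.count(term) per term (simpler; quadratic instead of linear, no speed claim).

-- ===== PORT A =====
-- query_vector = {}; for term in vocabulary: query_vector[term] = 0
-- for term in query_terms: if term in query_vector: query_vector[term] += 1
def build_query_vector (query_terms : List String) (vocabulary : List String) : List (String × Int) :=
  let init : PySem.Dict String Int :=
    vocabulary.foldl (fun d term => d.insert term 0) PySem.Dict.empty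
  let final : PySem.Dict String Int :=
    query_terms.foldl
      (fun d term => if d.contains term then d.insert term (d.getD term 0 + 1) else d) init
  final.items

-- ===== PORT B =====
-- {term: query_terms.count(term) for term in vocabulary}
def build_query_vector_alt (query_terms : List String) (vocabulary : List String) : List (String × Int) :=
  (vocabulary.foldl
    (fun d term => d.insert term ((PySem.List.count query_terms term : Nat) : Int))
    PySem.Dict.empty).items

-- ===== PRECONDITION & SPEC =====
def Spec_build_query_vector (query_terms : List String) (vocabulary : List String) (out : List (String × Int)) : Prop := out = build_query_vector_alt query_terms vocabulary
instance (query_terms : List String) (vocabulary : List String) (out : List (String × Int)) : Decidable (Spec_build_query_vector query_terms vocabulary out) := by unfold Spec_build_query_vector; infer_instance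

-- ===== CLAIM (what is proved, stated in full; the proofs are below) =====
def Claim_equal_build_query_vector : Prop := ∀ (query_terms : List String) (vocabulary : List String), Dom_build_query_vector query_terms vocabulary → Spec_build_query_vector query_terms vocabulary (build_query_vector query_terms vocabulary)

-- ===== LEMMAS AND PROOFS =====

-- A's query loop never changes the key list (the guarded insert overwrites in place).
theorem keys_queryLoop (qs : List String) (d : PySem.Dict String Int) :
    (qs.foldl (fun d term => if d.contains term then d.insert term (d.getD term 0 + 1) else d) d).keys
      = d.keys := by
  induction qs generalizing d with
  | nil => rfl
  | cons t qs ih =>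
    simp only [List.foldl_cons]
    by_cases h : d.contains t = true
    · rw [if_pos h, ih, PySem.Dict.keys_insert_of_contains _ _ h]
    · rw [if_neg h]
      exact ih d

-- Value at any key after A's query loop: the guard freezes membership, so each key
-- contained in d gains the count of its occurrences in qs.
theorem getD_queryLoop (qs : List String) (d : PySem.Dict String Int) (k : String) :
    (qs.foldl (fun d term => if d.contains term then d.insert term (d.getD term 0 + 1) else d) d).getD k 0
      = d.getD k 0 + (if d.contains k then (qs.count k : Int) else 0) := by
  induction qs generalizing d with
  | nil => simp
  | cons t qs ih =>
    simp only [List.foldl_cons]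
    by_cases ht : d.contains t = true
    · rw [if_pos ht, ih]
      by_cases hk : k = t
      · subst hk
        simp [PySem.Dict.getD_insert_self, PySem.Dict.contains_insert_self, ht,
          List.count_cons_self]
        ring
      · rw [PySem.Dict.getD_insert_of_ne _ _ _ hk, PySem.Dict.contains_insert]
        have hbe : (k == t) = false := by simp [hk]
        simp [hbe, Ne.symm hk]
    · rw [if_neg ht, ih]
      by_cases hk : k = t
      · subst hk; simp [ht]
      · simp [Ne.symm hk]

-- Value at any key of a vocabulary-driven insert pass whose values depend only on the key.
theorem getD_fillLoop (vs : List String) (c : String → Int) (d : PySem.Dict String Int) (k : String) :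
    (vs.foldl (fun d term => d.insert term (c term)) d).getD k 0
      = if k ∈ vs then c k else d.getD k 0 := by
  induction vs generalizing d with
  | nil => simp
  | cons t vs ih =>
    simp only [List.foldl_cons, ih]
    by_cases hm : k ∈ vs
    · simp [hm]
    · by_cases hk : k = t
      · subst hk; simp [hm, PySem.Dict.getD_insert_self]
      · simp [hm, hk, PySem.Dict.getD_insert_of_ne _ _ _ hk]

-- ===== VERDICT (by name: the statement is the Claim_ definition above) =====
theorem build_query_vector_spec : Claim_equal_build_query_vector := by
  intro qs vs _
  show build_query_vector qs vs = build_query_vector_alt qs vs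
  unfold build_query_vector build_query_vector_alt
  dsimp only
  set init : PySem.Dict String Int :=
    vs.foldl (fun d term => d.insert term 0) PySem.Dict.empty with hinit
  set dA : PySem.Dict String Int :=
    qs.foldl (fun d term => if d.contains term then d.insert term (d.getD term 0 + 1) else d) init
    with hdA
  set dB : PySem.Dict String Int :=
    vs.foldl (fun d term => d.insert term ((PySem.List.count qs term : Nat) : Int)) PySem.Dict.empty
    with hdB
  have hkinit : init.keys = PySem.Set.update ((PySem.Dict.empty : PySem.Dict String Int).keys) vs := by
    rw [hinit]; exact PySem.Dict.keys_foldl_insert vs _ _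
  have hkA : dA.keys = PySem.Set.ofList vs := by
    rw [hdA, keys_queryLoop, hkinit]
    simp [PySem.Dict.keys_empty, PySem.Set.update_nil_left]
  have hkB : dB.keys = PySem.Set.ofList vs := by
    rw [hdB, PySem.Dict.keys_foldl_insert]
    simp [PySem.Dict.keys_empty, PySem.Set.update_nil_left]
  have hndA : dA.keys.Nodup := by rw [hkA]; exact PySem.Set.nodup_ofList vs
  have hndB : dB.keys.Nodup := by rw [hkB]; exact PySem.Set.nodup_ofList vs
  show dA.items = dB.items
  rw [PySem.Dict.items_eq_map_keys dA hndA 0, PySem.Dict.items_eq_map_keys dB hndB 0,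
    hkA, hkB]
  apply List.map_congr_left
  intro k hk
  have hkv : k ∈ vs := (PySem.Set.mem_ofList _ _).mp hk
  have hcontains : init.contains k = true := by
    have : k ∈ init.keys := by
      rw [hkinit]; simp [PySem.Dict.keys_empty, PySem.Set.update_nil_left,
        PySem.Set.mem_ofList, hkv]
    exact (PySem.Dict.contains_iff_mem_keys _ _).mpr this
  have hAval : dA.getD k 0 = (qs.count k : Int) := by
    rw [hdA, getD_queryLoop, if_pos hcontains, hinit, getD_fillLoop vs (fun _ => 0)]
    simp [hkv]
  have hBval : dB.getD k 0 = (qs.count k : Int) := by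
    rw [hdB, getD_fillLoop vs (fun t => ((PySem.List.count qs t : Nat) : Int)), if_pos hkv,
      PySem.List.count_eq]
  rw [hAval, hBval]
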